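-- pv_equiv track=rewrite | github.com/devYuMinKim/Coding_Test_with_JavaScript | 20221102/모범답안/20221102_06/battleground.py | solution
-- ===== SOURCE A (Python) =====
-- def solution(n, stat1, stat2):
--     '''
--     :param n: int
--     :param stat1: list
--     :param stat2: list
--     :return: string
--     '''
--     x = [(int(i[1]), i[0]) for i in enumerate(stat1)]
--     y = [(int(i[1]), i[0]) for i in enumerate(stat2)]
--     x = sorted(x, reverse=True)
--     y = sorted(y, reverse=True)
--
--     q = set()
--     for i in range(n):
--         q.add(x[i][1])
--         q.add(y[i][1])
--         if len(q) == i + 1: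
--             break
--
--     answer = ['0'] * n
--     for i in q:
--         answer[i] = '1'
--
--     return ''.join(answer)
-- ===== SOURCE B (Python) =====
-- def solution(n, stat1, stat2):
--     # rank-based reformulation: rank each index by (value desc, index desc),
--     # m[j] = best (smallest) of its two ranks; the loop of A stops at the first
--     # k >= 1 with |{j : m[j] < k}| = k (k = n always works), and marks exactly
--     # those indices.  Found here with a counting array and a prefix-sum scan.
--     def ranks(stat):
--         r = [0] * len(stat)
--         for pos, (_, j) in enumerate(sorted(((v, j) for j, v in enumerate(stat)), reverse=True)):
--             r[j] = pos
--         return r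
--     rx, ry = ranks(stat1), ranks(stat2)
--     m = [min(rx[j], ry[j]) for j in range(n)]
--     bucket = [0] * n
--     for v in m:
--         bucket[v] += 1
--     k = n
--     running = 0
--     for t in range(1, n + 1):
--         running += bucket[t - 1]
--         if running == t:
--             k = t
--             break
--     return ''.join('1' if v < k else '0' for v in m)
-- ===== Notes on version B (the rewrite author's own statement) =====
-- stated objective: alternative
-- what changed: Replaces A's incremental set-union loop (add the i-th best of each list, break when the set size hits i+1) by a rank computation: each index gets m[j] = min(rank in stat1, rank in stat2) from the two sorted orders, the stop point k is found as the first fixpoint of the rank-histogram prefix sums, and index j is marked iff m[j] < k.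
-- outside the precondition, e.g. on solution(1, [5, 1], [5, 1]): A returns '1', B returns '1'; on solution(5, [3], [3]): A returns '10000', B raises IndexError
import Mathlib
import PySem

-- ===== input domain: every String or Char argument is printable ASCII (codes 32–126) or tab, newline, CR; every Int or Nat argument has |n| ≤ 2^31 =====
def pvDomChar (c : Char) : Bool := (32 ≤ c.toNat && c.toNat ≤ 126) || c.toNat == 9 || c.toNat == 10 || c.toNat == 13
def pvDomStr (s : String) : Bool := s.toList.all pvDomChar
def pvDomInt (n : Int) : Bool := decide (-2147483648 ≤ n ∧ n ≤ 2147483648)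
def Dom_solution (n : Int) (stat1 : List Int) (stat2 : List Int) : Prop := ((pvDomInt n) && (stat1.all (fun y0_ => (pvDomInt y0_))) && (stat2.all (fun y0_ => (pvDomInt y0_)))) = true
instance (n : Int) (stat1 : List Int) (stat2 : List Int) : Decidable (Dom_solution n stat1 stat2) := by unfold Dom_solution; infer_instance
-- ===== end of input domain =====

-- B replaces A's incremental set-union loop by ranks + histogram prefix-sum scan (alternative algorithm, same cost).

-- ===== PORT A =====
-- sorted(x, reverse=True) on (value, index) pairs; Python compares the tuples lexicographically
def pvSortDesc (xs : List (Int × Int)) : List (Int × Int) :=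
  PySem.List.sorted2 xs (fun p => p.1) (fun p => p.2) true

-- [(int(i[1]), i[0]) for i in enumerate(stat)]
def pvPairs (stat : List Int) : List (Int × Int) :=
  (PySem.List.enumerate stat).map (fun i => (i.2, i.1))

-- 'for i in range(n): q.add(x[i][1]); q.add(y[i][1]); if len(q) == i + 1: break'
-- x[i]/y[i] are in range on Pre_solution, so pyGetD's default is never read there
def pvALoop (x y : List (Int × Int)) : Nat → Int → PySem.Set Int → PySem.Set Int
  | 0, _, q => q
  | fuel+1, i, q =>
    let q1 := PySem.Set.add q (PySem.List.pyGetD x i (0, 0)).2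
    let q2 := PySem.Set.add q1 (PySem.List.pyGetD y i (0, 0)).2
    if PySem.Set.len q2 = i + 1 then q2 else pvALoop x y fuel (i + 1) q2

def solution (n : Int) (stat1 : List Int) (stat2 : List Int) : String :=
  let x := pvSortDesc (pvPairs stat1)
  let y := pvSortDesc (pvPairs stat2)
  let q := pvALoop x y n.toNat 0 PySem.Set.empty
  -- answer = ['0'] * n; for i in q: answer[i] = '1'  (independent writes, so the
  -- set's iteration order cannot affect the result; on Pre_solution each i is a valid index)
  let answer := List.foldl (fun a (i : Int) => a.set i.toNat '1') (List.replicate n.toNat '0') q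
  String.ofList answer

-- ===== PORT B =====
-- sorted(((v, j) for j, v in enumerate(stat)), reverse=True)
def pvBSortedPairs (stat : List Int) : List (Int × Int) :=
  PySem.List.sorted2 ((PySem.List.enumerate stat).map (fun i => (i.2, i.1)))
    (fun p => p.1) (fun p => p.2) true

-- r = [0] * len(stat); for pos, (_, j) in enumerate(sorted(...)): r[j] = pos
-- (each j is an index of stat, so .toNat/.set are exact)
def pvRanks (stat : List Int) : List Int :=
  (PySem.List.enumerate (pvBSortedPairs stat)).foldl
    (fun r pj => r.set pj.2.2.toNat pj.1) (List.replicate stat.length 0)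

-- k = n; running = 0; for t in range(1, n + 1): running += bucket[t-1]; if running == t: k = t; break
def pvBFindK (bucket : List Int) (n : Int) : Nat → Int → Int → Int
  | 0, _, _ => n
  | fuel+1, t, running =>
    let running' := running + PySem.List.pyGetD bucket (t - 1) 0
    if running' = t then t else pvBFindK bucket n fuel (t + 1) running'

def solution_alt (n : Int) (stat1 : List Int) (stat2 : List Int) : String :=
  let rx := pvRanks stat1
  let ry := pvRanks stat2
  let m := (PySem.List.pyRange 0 n).map
    (fun j => min (PySem.List.pyGetD rx j 0) (PySem.List.pyGetD ry j 0))
  -- bucket = [0] * n; for v in m: bucket[v] += 1   (0 ≤ v < n on Pre_solution)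
  let bucket := m.foldl (fun b v => PySem.List.pySetD b v (PySem.List.pyGetD b v 0 + 1))
    (List.replicate n.toNat 0)
  let k := pvBFindK bucket n n.toNat 1 0
  String.ofList (m.map (fun v => if v < k then '1' else '0'))

-- ===== PRECONDITION & SPEC =====
-- Pre_ restricts to the natural domain n = len(stat1) = len(stat2) (plus the trivially-empty n ≤ 0):
-- for other n, A raises IndexError on most inputs, and where its break happens to fire early enough
-- for A to return, the value is an accident of how far A's loop got (see claim.json cites).
def Pre_solution (n : Int) (stat1 : List Int) (stat2 : List Int) : Prop :=
  n ≤ 0 ∨ (n = stat1.length ∧ n = stat2.length)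
instance (n : Int) (stat1 : List Int) (stat2 : List Int) : Decidable (Pre_solution n stat1 stat2) := by
  unfold Pre_solution; infer_instance

def pvWitness_solution : Int × List Int × List Int := (2, [3, 5], [4, 1])

def Spec_solution (n : Int) (stat1 : List Int) (stat2 : List Int) (out : String) : Prop :=
  out = solution_alt n stat1 stat2
instance (n : Int) (stat1 : List Int) (stat2 : List Int) (out : String) :
    Decidable (Spec_solution n stat1 stat2 out) := by unfold Spec_solution; infer_instance

-- ===== CLAIM (what is proved, stated in full; the proofs are below) =====
def Claim_equal_solution : Prop := ∀ (n : Int) (stat1 : List Int) (stat2 : List Int),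
  Dom_solution n stat1 stat2 → Pre_solution n stat1 stat2 →
  Spec_solution n stat1 stat2 (solution n stat1 stat2)

-- ===== LEMMAS AND PROOFS =====

-- proof-side helpers ---------------------------------------------------------

-- the second components ("original indices") of a pair list
def pvSnd (xs : List (Int × Int)) : List Int := xs.map (fun p => p.2)

-- m-value of index j: its better (smaller) rank among the two sorted orders
def pvMval (x y : List (Int × Int)) (j : Int) : Int :=
  min ((List.idxOf j (pvSnd x) : Int)) ((List.idxOf j (pvSnd y) : Int))

-- number of indices in range(n) whose m-value is < t
def pvCnt (x y : List (Int × Int)) (n t : Int) : Int :=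
  ((PySem.List.pyRange 0 n).countP (fun j => decide (pvMval x y j < t)) : Int)

-- A's set after i completed iterations with no break yet
def pvQ (x y : List (Int × Int)) (i : Nat) : PySem.Set Int :=
  (List.range i).foldl
    (fun q t => PySem.Set.add (PySem.Set.add q (x.getD t (0, 0)).2) ((y.getD t (0, 0)).2)) []

def pvCntM (m : List Int) (t : Int) : Int := (m.countP (fun v => decide (v < t)) : Int)

lemma pvSnd_pvBSortedPairs_perm (stat : List Int) :
    (pvSnd (pvBSortedPairs stat)).Perm (PySem.List.pyRange 0 stat.length) := by
  have h1 : ((PySem.List.enumerate stat).map (fun i => ((i.2 : Int), (i.1 : Int)))).map (fun p => p.2)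
      = PySem.List.pyRange 0 stat.length := by
    rw [List.map_map]
    have := PySem.List.map_fst_enumerate stat 0
    simpa using this
  have hperm := PySem.List.sorted2_perm ((PySem.List.enumerate stat).map (fun i => (i.2, i.1)))
    (fun p : Int × Int => p.1) (fun p => p.2) true
  have := hperm.map (fun p : Int × Int => p.2)
  rw [h1] at this
  exact this

lemma pvCountP_lt_succ (m : List Int) (t : Int) :
    m.countP (fun v => decide (v < t + 1)) = m.countP (fun v => decide (v < t)) + m.count t := by
  induction m with
  | nil => simp
  | cons a m ih =>
    simp only [List.countP_cons, List.count_cons, ih]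
    by_cases h1 : a < t + 1 <;> by_cases h2 : a < t <;> by_cases h3 : a = t <;>
      simp [h1, h2, h3] <;> omega

lemma pvFoldlMark_length (q : List Int) :
    ∀ (ans : List Char), (List.foldl (fun a (i : Int) => a.set i.toNat '1') ans q).length = ans.length := by
  induction q with
  | nil => intro ans; rfl
  | cons v q ih => intro ans; simp [List.foldl_cons, ih, List.length_set]

lemma pvFoldlMark_getD (q : List Int) :
    ∀ (ans : List Char) (j : Nat), j < ans.length → (∀ v ∈ q, 0 ≤ v) →
    (List.foldl (fun a (i : Int) => a.set i.toNat '1') ans q).getD j 'z'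
      = if (j : Int) ∈ q then '1' else ans.getD j 'z' := by
  induction q with
  | nil => intro ans j hj hq; simp
  | cons v q ih =>
    intro ans j hj hq
    have hv0 : 0 ≤ v := hq v (by simp)
    rw [List.foldl_cons]
    rw [ih (ans.set v.toNat '1') j (by simpa using hj) (fun w hw => hq w (by simp [hw]))]
    by_cases hmq : (j : Int) ∈ q
    · simp [hmq]
    · by_cases hjv : (j : Int) = v
      · have : v.toNat = j := by omega
        simp [hmq, hjv.symm, List.getD_eq_getElem?_getD, this, List.getElem?_set_self hj]
      · have : v.toNat ≠ j := by omega
        simp [hmq, hjv, List.getD_eq_getElem?_getD, List.getElem?_set_ne this]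

lemma pvFoldlRank_getD (xs : List (Int × Int)) :
    ∀ (init : List Int) (s : Int) (j : Nat), j < init.length →
    ((xs.map (fun p => p.2)).Nodup) →
    (∀ p ∈ xs, 0 ≤ p.2 ∧ p.2 < (init.length : Int)) →
    ((PySem.List.enumerate xs s).foldl (fun r pj => r.set pj.2.2.toNat pj.1) init).getD j 0
      = if (j : Int) ∈ xs.map (fun p => p.2)
          then s + (List.idxOf (j : Int) (xs.map (fun p => p.2)) : Int)
          else init.getD j 0 := by
  induction xs with
  | nil => intro init s j hj _ _; simp [PySem.List.enumerate_nil]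
  | cons p xs ih =>
    intro init s j hj hnd hrange
    obtain ⟨v, i⟩ := p
    rw [PySem.List.enumerate_cons, List.foldl_cons]
    have hi0 : 0 ≤ i := (hrange (v, i) (by simp)).1
    have hilt : i < (init.length : Int) := (hrange (v, i) (by simp)).2
    have hlen' : (init.set i.toNat s).length = init.length := List.length_set
    have hnd' : (xs.map (fun p => p.2)).Nodup := (List.nodup_cons.mp (by simpa using hnd)).2
    have hni : i ∉ xs.map (fun p => p.2) := (List.nodup_cons.mp (by simpa using hnd)).1
    rw [ih (init.set i.toNat s) (s + 1) j (by omega)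
      hnd' (fun p hp => by have := hrange p (by simp [hp]); omega)]
    by_cases hji : (j : Int) = i
    · have htn : i.toNat = j := by omega
      simp only [hji.symm] at hni ⊢
      simp [hni, List.idxOf_cons, List.getD_eq_getElem?_getD, htn,
        List.getElem?_set_self hj]
    · by_cases hjm : (j : Int) ∈ xs.map (fun p => p.2)
      · have : (i == (j:Int)) = false := by simp [Ne.symm hji]
        simp [hjm, hji, List.idxOf_cons, this]
        push_cast
        ring
      · have htn : i.toNat ≠ j := by omega
        simp [hjm, hji, List.getD_eq_getElem?_getD, List.getElem?_set_ne htn]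

lemma pvFoldlBucket_getD (m : List Int) :
    ∀ (init : List Int) (u : Nat), u < init.length →
    (∀ v ∈ m, 0 ≤ v ∧ v < (init.length : Int)) →
    (m.foldl (fun b v => PySem.List.pySetD b v (PySem.List.pyGetD b v 0 + 1)) init).getD u 0
      = init.getD u 0 + (m.count (u : Int) : Int) := by
  induction m with
  | nil => intro init u hu _; simp
  | cons v m ih =>
    intro init u hu hv
    have hv0 : 0 ≤ v := (hv v (by simp)).1
    have hvl : v < (init.length : Int) := (hv v (by simp)).2
    rw [List.foldl_cons]
    have hset : PySem.List.pySetD init v (PySem.List.pyGetD init v 0 + 1)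
        = init.set v.toNat (PySem.List.pyGetD init v 0 + 1) := PySem.List.pySetD_of_nonneg _ _ hv0
    have hlen' : (init.set v.toNat (PySem.List.pyGetD init v 0 + 1)).length = init.length :=
      List.length_set
    rw [hset, ih _ u (by omega) (fun w hw => by have := hv w (by simp [hw]); omega)]
    by_cases hju : (u : Int) = v
    · have htn : v.toNat = u := by omega
      have hg : PySem.List.pyGetD init v 0 = init.getD u 0 := by
        rw [PySem.List.pyGetD_eq_getElem _ _ hv0 (by simpa using hvl)]
        simp [htn, List.getD_eq_getElem?_getD, List.getElem?_eq_getElem hu]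
      simp [List.count_cons, hju.symm, List.getD_eq_getElem?_getD, htn,
        List.getElem?_set_self hu, hg]
      push_cast
      ring
    · have htn : v.toNat ≠ u := by omega
      have : (v == (u:Int)) = false := by simp [Ne.symm hju]
      simp [List.count_cons, this, List.getD_eq_getElem?_getD, List.getElem?_set_ne htn]

lemma pvFoldlBucket_length (m : List Int) :
    ∀ (init : List Int),
    (∀ v ∈ m, 0 ≤ v ∧ v < (init.length : Int)) →
    (m.foldl (fun b v => PySem.List.pySetD b v (PySem.List.pyGetD b v 0 + 1)) init).length
      = init.length := by
  induction m with
  | nil => intro init _; rfl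
  | cons v m ih =>
    intro init hv
    have hv0 : 0 ≤ v := (hv v (by simp)).1
    rw [List.foldl_cons, PySem.List.pySetD_of_nonneg _ _ hv0]
    rw [ih _ (fun w hw => by have := hv w (by simp [hw]); simpa [List.length_set] using this)]
    exact List.length_set

lemma pvSnd_nodup (stat : List Int) : (pvSnd (pvBSortedPairs stat)).Nodup :=
  ((pvSnd_pvBSortedPairs_perm stat).nodup_iff).mpr (PySem.List.nodup_pyRange_one _ _)

lemma pvSnd_mem (stat : List Int) (j : Int) :
    j ∈ pvSnd (pvBSortedPairs stat) ↔ 0 ≤ j ∧ j < (stat.length : Int) := by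
  rw [(pvSnd_pvBSortedPairs_perm stat).mem_iff, PySem.List.mem_pyRange_one]

lemma pvRanks_getD (stat : List Int) (j : Nat) (hj : j < stat.length) :
    (pvRanks stat).getD j 0 = (List.idxOf (j : Int) (pvSnd (pvBSortedPairs stat)) : Int) := by
  rw [pvRanks, pvFoldlRank_getD _ _ _ j (by simpa using hj) (pvSnd_nodup stat)
    (fun p hp => by
      have : p.2 ∈ pvSnd (pvBSortedPairs stat) := List.mem_map_of_mem hp
      rw [pvSnd_mem] at this
      simpa using this)]
  have : (j : Int) ∈ pvSnd (pvBSortedPairs stat) := by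
    rw [pvSnd_mem]; constructor <;> omega
  simp only [pvSnd] at this
  simp [this, pvSnd]

lemma pvQ_nodup (x y : List (Int × Int)) (i : Nat) : (pvQ x y i).Nodup := by
  induction i with
  | zero => simp [pvQ]
  | succ i ih =>
    rw [pvQ, List.range_succ, List.foldl_append]
    exact PySem.Set.nodup_add _ _ (PySem.Set.nodup_add _ _ ih)

lemma pvQ_succ (x y : List (Int × Int)) (i : Nat) :
    pvQ x y (i + 1)
      = PySem.Set.add (PySem.Set.add (pvQ x y i) (x.getD i (0, 0)).2) ((y.getD i (0, 0)).2) := by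
  simp [pvQ, List.range_succ]

lemma pvQ_mem (x y : List (Int × Int)) (n : Int) (L : Nat) (hLn : (L : Int) = n)
    (hx : (pvSnd x).Perm (PySem.List.pyRange 0 n))
    (hy : (pvSnd y).Perm (PySem.List.pyRange 0 n)) :
    ∀ (i : Nat), i ≤ L → ∀ (j : Int),
      (j ∈ pvQ x y i ↔ (0 ≤ j ∧ j < n ∧ pvMval x y j < (i : Int))) := by
  have hxlen : (pvSnd x).length = L := by
    rw [hx.length_eq, PySem.List.length_pyRange_one]; omega
  have hylen : (pvSnd y).length = L := by
    rw [hy.length_eq, PySem.List.length_pyRange_one]; omega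
  have hxnd : (pvSnd x).Nodup := hx.nodup_iff.mpr (PySem.List.nodup_pyRange_one _ _)
  have hynd : (pvSnd y).Nodup := hy.nodup_iff.mpr (PySem.List.nodup_pyRange_one _ _)
  intro i
  induction i with
  | zero =>
    intro _ j
    simp only [pvQ, List.range_zero, List.foldl_nil]
    constructor
    · intro h; exact absurd h (List.not_mem_nil)
    · rintro ⟨_, _, h⟩
      exfalso
      have : (0:Int) ≤ pvMval x y j := by
        unfold pvMval; positivity
      omega
  | succ i ih =>
    intro hi1 j
    have hiL : i < L := by omega
    have hgx : (x.getD i (0, 0)).2 = (pvSnd x)[i]'(by omega) := by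
      have hix : i < x.length := by
        have : (pvSnd x).length = x.length := by simp [pvSnd]
        omega
      simp [pvSnd, List.getD_eq_getElem?_getD, List.getElem?_eq_getElem hix]
    have hgy : (y.getD i (0, 0)).2 = (pvSnd y)[i]'(by omega) := by
      have hiy : i < y.length := by
        have : (pvSnd y).length = y.length := by simp [pvSnd]
        omega
      simp [pvSnd, List.getD_eq_getElem?_getD, List.getElem?_eq_getElem hiy]
    rw [pvQ_succ, PySem.Set.mem_add, PySem.Set.mem_add, ih (by omega), hgx, hgy]
    constructor
    · rintro ((⟨h1, h2, h3⟩ | hjx) | hjy)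
      · exact ⟨h1, h2, by push_cast; omega⟩
      · have hmem : (j : Int) ∈ pvSnd x := hjx ▸ List.getElem_mem _
        have hrange := hx.mem_iff.mp hmem
        rw [PySem.List.mem_pyRange_one] at hrange
        refine ⟨hrange.1, hrange.2, ?_⟩
        have hidx : List.idxOf j (pvSnd x) = i := by
          rw [hjx]; exact List.Nodup.idxOf_getElem hxnd i (by omega)
        unfold pvMval
        have : ((List.idxOf j (pvSnd x) : Nat) : Int) = (i : Int) := by rw [hidx]
        push_cast at this ⊢
        omega
      · have hmem : (j : Int) ∈ pvSnd y := hjy ▸ List.getElem_mem _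
        have hrange := hy.mem_iff.mp hmem
        rw [PySem.List.mem_pyRange_one] at hrange
        refine ⟨hrange.1, hrange.2, ?_⟩
        have hidx : List.idxOf j (pvSnd y) = i := by
          rw [hjy]; exact List.Nodup.idxOf_getElem hynd i (by omega)
        unfold pvMval
        have : ((List.idxOf j (pvSnd y) : Nat) : Int) = (i : Int) := by rw [hidx]
        push_cast at this ⊢
        omega
    · rintro ⟨h1, h2, h3⟩
      by_cases hlt : pvMval x y j < (i : Int)
      · exact Or.inl (Or.inl ⟨h1, h2, hlt⟩)
      · -- pvMval = i: one of the idxOf equals i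
        have heq : pvMval x y j = (i : Int) := by push_cast at h3 ⊢; omega
        unfold pvMval at heq
        rcases min_cases ((List.idxOf j (pvSnd x) : Int)) ((List.idxOf j (pvSnd y) : Int)) with
          ⟨hm, _⟩ | ⟨hm, _⟩
        · rw [hm] at heq
          have hidx : List.idxOf j (pvSnd x) = i := by exact_mod_cast heq
          have hlt' : List.idxOf j (pvSnd x) < (pvSnd x).length := by omega
          have h5 : (pvSnd x)[List.idxOf j (pvSnd x)]? = some j := by
            rw [List.getElem?_eq_getElem hlt', List.getElem_idxOf hlt']
          rw [hidx] at h5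
          rw [List.getElem?_eq_getElem (by omega : i < (pvSnd x).length)] at h5
          exact Or.inl (Or.inr (Option.some_inj.mp h5).symm)
        · rw [hm] at heq
          have hidx : List.idxOf j (pvSnd y) = i := by exact_mod_cast heq
          have hlt' : List.idxOf j (pvSnd y) < (pvSnd y).length := by omega
          have h5 : (pvSnd y)[List.idxOf j (pvSnd y)]? = some j := by
            rw [List.getElem?_eq_getElem hlt', List.getElem_idxOf hlt']
          rw [hidx] at h5
          rw [List.getElem?_eq_getElem (by omega : i < (pvSnd y).length)] at h5
          exact Or.inr (Option.some_inj.mp h5).symm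

lemma pvLen_eq_countP (q : List Int) (n : Int) (hq : q.Nodup)
    (hsub : ∀ j ∈ q, j ∈ PySem.List.pyRange 0 n) :
    (q.length : Int) = ((PySem.List.pyRange 0 n).countP (fun j => decide (j ∈ q)) : Int) := by
  rw [List.countP_eq_length_filter]
  have hperm : ((PySem.List.pyRange 0 n).filter (fun j => decide (j ∈ q))).Perm q := by
    rw [List.perm_ext_iff_of_nodup ((PySem.List.nodup_pyRange_one 0 n).filter _) hq]
    intro a
    simp only [List.mem_filter, decide_eq_true_eq]
    exact ⟨fun h => h.2, fun h => ⟨hsub a h, h⟩⟩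
  rw [hperm.length_eq]

lemma pvCnt_top (x y : List (Int × Int)) (n : Int) (hn : 0 ≤ n)
    (hx : (pvSnd x).Perm (PySem.List.pyRange 0 n)) :
    pvCnt x y n n = n := by
  unfold pvCnt
  have h : ∀ j ∈ PySem.List.pyRange 0 n, (decide (pvMval x y j < n)) = true := by
    intro j hj
    have hmem : j ∈ pvSnd x := hx.mem_iff.mpr hj
    have hlen : (pvSnd x).length = n.toNat := by
      rw [hx.length_eq, PySem.List.length_pyRange_one]; simp
    have hidx : List.idxOf j (pvSnd x) < (pvSnd x).length := by
      rw [List.idxOf_lt_length_iff]; exact hmem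
    rw [PySem.List.mem_pyRange_one] at hj
    simp only [decide_eq_true_eq]
    have h2 : List.idxOf j (pvSnd x) < n.toNat := hlen ▸ hidx
    have h3 : ((List.idxOf j (pvSnd x) : Nat) : Int) < n := by omega
    unfold pvMval
    exact lt_of_le_of_lt (min_le_left _ _) h3
  rw [List.countP_eq_length.mpr h, PySem.List.length_pyRange_one]
  omega

lemma pvSetLen_eq (q : PySem.Set Int) : PySem.Set.len q = (q.length : Int) := rfl

lemma pvBFindK_spec (bucket m : List Int) (n : Int) (hn : 1 ≤ n)
    (hblen : (bucket.length : Int) = n)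
    (hb : ∀ u : Nat, (u : Int) < n → bucket.getD u 0 = (m.count (u : Int) : Int)) :
    ∀ (fuel : Nat) (t running : Int), 1 ≤ t → t + fuel = n + 1 →
    running = pvCntM m (t - 1) →
    (∀ s, 1 ≤ s → s < t → pvCntM m s ≠ s) →
    (1 ≤ pvBFindK bucket n fuel t running ∧ pvBFindK bucket n fuel t running ≤ n ∧
     (∀ s, 1 ≤ s → s < pvBFindK bucket n fuel t running → pvCntM m s ≠ s) ∧
     (pvCntM m (pvBFindK bucket n fuel t running) = pvBFindK bucket n fuel t running ∨
      pvBFindK bucket n fuel t running = n)) := by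
  intro fuel
  induction fuel with
  | zero =>
    intro t running ht1 htf _ hmin
    exact ⟨hn, le_refl n,
      fun s hs1 hs2 => hmin s hs1 (by have h : s < n := hs2; omega), Or.inr rfl⟩
  | succ fuel ih =>
    intro t running ht1 htf hrun hmin
    have htn : t ≤ n := by omega
    have hget : PySem.List.pyGetD bucket (t - 1) 0 = (m.count (t - 1) : Int) := by
      rw [PySem.List.pyGetD_of_nonneg _ _ (by omega : (0:Int) ≤ t - 1)]
      have := hb (t - 1).toNat (by omega)
      rw [show (((t - 1).toNat : Int)) = t - 1 by omega] at this
      exact this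
    have hrun' : running + PySem.List.pyGetD bucket (t - 1) 0 = pvCntM m t := by
      rw [hget, hrun]
      unfold pvCntM
      have := pvCountP_lt_succ m (t - 1)
      rw [show t - 1 + 1 = t by ring] at this
      rw [this]
      push_cast
      ring
    simp only [pvBFindK]
    rw [hrun']
    by_cases hbrk : pvCntM m t = t
    · simp only [hbrk, if_pos rfl]
      exact ⟨ht1, htn, fun s hs1 hs2 => hmin s hs1 hs2, Or.inl hbrk⟩
    · rw [if_neg (by omega)]
      exact ih (t + 1) (pvCntM m t) (by omega) (by omega)
        (by rw [show t + 1 - 1 = t by ring])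
        (fun s hs1 hs2 => by
          by_cases hst : s < t
          · exact hmin s hs1 hst
          · have : s = t := by omega
            rw [this]; exact hbrk)

lemma pvALoop_corr (x y : List (Int × Int)) (n : Int) (L : Nat) (hLn : (L : Int) = n)
    (hL1 : 1 ≤ L)
    (hx : (pvSnd x).Perm (PySem.List.pyRange 0 n))
    (hy : (pvSnd y).Perm (PySem.List.pyRange 0 n))
    (K : Int) (hK1 : 1 ≤ K) (hKn : K ≤ n)
    (hKmin : ∀ s, 1 ≤ s → s < K → pvCnt x y n s ≠ s)
    (hKfix : pvCnt x y n K = K) :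
    ∀ (fuel i : Nat), i + fuel = L →
    (∀ s, 1 ≤ s → s ≤ (i : Int) → pvCnt x y n s ≠ s) →
    pvALoop x y fuel (i : Int) (pvQ x y i) = pvQ x y K.toNat := by
  have hlenQ : ∀ (i : Nat), i ≤ L → PySem.Set.len (pvQ x y i) = pvCnt x y n (i : Int) := by
    intro i hi
    rw [pvSetLen_eq]
    rw [pvLen_eq_countP (pvQ x y i) n (pvQ_nodup x y i) (fun j hj => by
      have := (pvQ_mem x y n L hLn hx hy i hi j).mp hj
      rw [PySem.List.mem_pyRange_one]
      exact ⟨this.1, this.2.1⟩)]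
    unfold pvCnt
    congr 1
    apply List.countP_congr
    intro j hj
    rw [PySem.List.mem_pyRange_one] at hj
    simp only [decide_eq_true_eq, decide_eq_decide]
    rw [pvQ_mem x y n L hLn hx hy i hi j]
    constructor
    · rintro ⟨_, _, h⟩; exact h
    · intro h; exact ⟨hj.1, hj.2, h⟩
  intro fuel
  induction fuel with
  | zero =>
    intro i hif hinv
    exfalso
    have hiL : i = L := by omega
    have := pvCnt_top x y n (by omega) hx
    exact hinv n (by omega) (by omega) this
  | succ fuel ih =>
    intro i hif hinv
    have hiL : i < L := by omega
    simp only [pvALoop]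
    have hq2 : PySem.Set.add (PySem.Set.add (pvQ x y i) (PySem.List.pyGetD x (i : Int) (0, 0)).2)
        ((PySem.List.pyGetD y (i : Int) (0, 0)).2) = pvQ x y (i + 1) := by
      rw [PySem.List.pyGetD_natCast, PySem.List.pyGetD_natCast, ← pvQ_succ]
    rw [hq2]
    rw [hlenQ (i + 1) (by omega)]
    by_cases hbrk : pvCnt x y n ((i : Int) + 1) = (i : Int) + 1
    · have hKi : K = (i : Int) + 1 := by
        by_contra hne
        rcases lt_or_gt_of_ne hne with hlt | hgt
        · exact hinv K hK1 (by omega) hKfix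
        · exact hKmin ((i : Int) + 1) (by omega) (by omega) hbrk
      rw [if_pos (by push_cast; omega)]
      congr 1
      omega
    · rw [if_neg (by push_cast at hbrk ⊢; omega)]
      have : ((i : Int) + 1) = (((i + 1 : Nat)) : Int) := by push_cast; ring
      rw [this]
      exact ih (i + 1) (by omega) (fun s hs1 hs2 => by
        by_cases hst : s ≤ (i : Int)
        · exact hinv s hs1 hst
        · have : s = (i : Int) + 1 := by omega
          rw [this]; exact hbrk)

lemma pvMval_bounds (x y : List (Int × Int)) (n : Int)
    (hx : (pvSnd x).Perm (PySem.List.pyRange 0 n)) (j : Int)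
    (hj : 0 ≤ j ∧ j < n) : 0 ≤ pvMval x y j ∧ pvMval x y j < n := by
  have hmem : j ∈ pvSnd x := hx.mem_iff.mpr (PySem.List.mem_pyRange_one.mpr hj)
  have hlen : (pvSnd x).length = n.toNat := by
    rw [hx.length_eq, PySem.List.length_pyRange_one]; simp
  have hidx : List.idxOf j (pvSnd x) < (pvSnd x).length := by
    rw [List.idxOf_lt_length_iff]; exact hmem
  constructor
  · unfold pvMval; positivity
  · have h3 : ((List.idxOf j (pvSnd x) : Nat) : Int) < n := by omega
    exact lt_of_le_of_lt (min_le_left _ _) h3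

-- ===== VERDICT (by name: the statement is the Claim_ definition above) =====
theorem solution_spec : Claim_equal_solution := by
  intro n stat1 stat2 _hdom hpre
  unfold Spec_solution
  by_cases hn0 : n ≤ 0
  · have h1 : n.toNat = 0 := by omega
    simp [solution, solution_alt, h1, PySem.List.pyRange_one_eq_nil hn0, pvALoop,
      PySem.Set.empty]
  · rcases hpre with h | ⟨hs1, hs2⟩
    · omega
    have hn1 : 1 ≤ n := by omega
    set L := stat1.length with hLdef
    have hLn : (L : Int) = n := hs1.symm
    have hL1 : 1 ≤ L := by omega
    have hnt : n.toNat = L := by omega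
    set x := pvSortDesc (pvPairs stat1) with hxdef
    set y := pvSortDesc (pvPairs stat2) with hydef
    have hxB : pvBSortedPairs stat1 = x := rfl
    have hyB : pvBSortedPairs stat2 = y := rfl
    have hx : (pvSnd x).Perm (PySem.List.pyRange 0 n) := by
      have := pvSnd_pvBSortedPairs_perm stat1
      rw [hxB] at this
      rwa [← hLn]
    have hy : (pvSnd y).Perm (PySem.List.pyRange 0 n) := by
      have := pvSnd_pvBSortedPairs_perm stat2
      rw [hyB] at this
      rwa [show ((stat2.length : Int)) = n from hs2.symm] at this
    -- the m list of B is the pvMval map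
    have hrx : ∀ (j : Int), 0 ≤ j → j < n →
        PySem.List.pyGetD (pvRanks stat1) j 0 = (List.idxOf j (pvSnd x) : Int) := by
      intro j hj0 hjn
      rw [PySem.List.pyGetD_of_nonneg _ _ hj0]
      rw [pvRanks_getD stat1 j.toNat (by omega)]
      rw [hxB, show ((j.toNat : Int)) = j by omega]
    have hry : ∀ (j : Int), 0 ≤ j → j < n →
        PySem.List.pyGetD (pvRanks stat2) j 0 = (List.idxOf j (pvSnd y) : Int) := by
      intro j hj0 hjn
      rw [PySem.List.pyGetD_of_nonneg _ _ hj0]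
      rw [pvRanks_getD stat2 j.toNat (by omega)]
      rw [hyB, show ((j.toNat : Int)) = j by omega]
    have hm : ((PySem.List.pyRange 0 n).map
        (fun j => min (PySem.List.pyGetD (pvRanks stat1) j 0)
                      (PySem.List.pyGetD (pvRanks stat2) j 0)))
        = (PySem.List.pyRange 0 n).map (fun j => pvMval x y j) := by
      apply List.map_congr_left
      intro j hj
      rw [PySem.List.mem_pyRange_one] at hj
      rw [hrx j hj.1 hj.2, hry j hj.1 hj.2]
      rfl
    set m := (PySem.List.pyRange 0 n).map (fun j => pvMval x y j) with hmdef
    have hmv : ∀ v ∈ m, 0 ≤ v ∧ v < n := by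
      intro v hv
      rw [hmdef, List.mem_map] at hv
      obtain ⟨j, hj, rfl⟩ := hv
      rw [PySem.List.mem_pyRange_one] at hj
      exact pvMval_bounds x y n hx j hj
    have hcnt : ∀ t, pvCntM m t = pvCnt x y n t := by
      intro t
      unfold pvCntM pvCnt
      rw [hmdef, List.countP_map]
      rfl
    -- bucket facts
    set bucket := m.foldl (fun b v => PySem.List.pySetD b v (PySem.List.pyGetD b v 0 + 1))
      (List.replicate n.toNat (0:Int)) with hbdef
    have hmv' : ∀ v ∈ m, 0 ≤ v ∧ v < ((List.replicate n.toNat (0:Int)).length : Int) := by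
      intro v hv
      have := hmv v hv
      simp only [List.length_replicate]
      omega
    have hblen : (bucket.length : Int) = n := by
      rw [hbdef, pvFoldlBucket_length m _ hmv']
      simp
      omega
    have hb : ∀ u : Nat, (u : Int) < n → bucket.getD u 0 = (m.count (u : Int) : Int) := by
      intro u hu
      rw [hbdef, pvFoldlBucket_getD m _ u (by simp; omega) hmv']
      rw [List.getD_eq_getElem?_getD]
      rw [List.getElem?_replicate]
      simp only [if_pos (by omega : u < n.toNat)]
      simp
    -- K facts
    set K := pvBFindK bucket n n.toNat 1 0 with hKdef
    have hK := pvBFindK_spec bucket m n hn1 hblen hb n.toNat 1 0 (by omega) (by omega)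
      (by
        unfold pvCntM
        have : m.countP (fun v => decide (v < 1 - 1)) = 0 := by
          rw [List.countP_eq_zero]
          intro v hv
          have := hmv v hv
          simp only [decide_eq_true_eq]
          omega
        rw [this]
        simp)
      (fun s hs1' hs2' => by omega)
    obtain ⟨hK1, hKn, hKmin, hKfix⟩ := hK
    rw [← hKdef] at hK1 hKn hKmin hKfix
    have hKmin' : ∀ s, 1 ≤ s → s < K → pvCnt x y n s ≠ s := by
      intro s h1 h2
      rw [← hcnt]
      exact hKmin s h1 h2
    have hKfix' : pvCnt x y n K = K := by
      rcases hKfix with h | h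
      · rw [← hcnt]; exact h
      · rw [h]; exact pvCnt_top x y n (by omega) hx
    -- A's loop result
    have hQ0 : pvQ x y 0 = PySem.Set.empty := rfl
    have hloop : pvALoop x y n.toNat 0 PySem.Set.empty = pvQ x y K.toNat := by
      have := pvALoop_corr x y n L hLn hL1 hx hy K hK1 hKn hKmin' hKfix' n.toNat 0
        (by omega) (fun s h1 h2 => by omega)
      rw [hQ0] at this
      simpa using this
    -- final string equality
    show String.ofList _ = String.ofList _
    congr 1
    have hKt : K.toNat ≤ L := by omega
    have hKtK : ((K.toNat : Nat) : Int) = K := by omega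
    have hqmem := pvQ_mem x y n L hLn hx hy K.toNat hKt
    apply List.ext_getElem
    · rw [pvFoldlMark_length]
      simp only [List.length_replicate, List.length_map]
      rw [PySem.List.length_pyRange_one]
      simp
    · intro j hj1 hj2
      have hjL : j < L := by
        rw [pvFoldlMark_length] at hj1
        simp only [List.length_replicate] at hj1
        omega
      have hjn : (j : Int) < n := by omega
      -- left side
      have hl : (List.foldl (fun a (i : Int) => a.set i.toNat '1')
          (List.replicate n.toNat '0') (pvALoop x y n.toNat 0 PySem.Set.empty))[j]
          = if pvMval x y (j : Int) < K then '1' else '0' := by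
        have hconv : (List.foldl (fun a (i : Int) => a.set i.toNat '1')
            (List.replicate n.toNat '0') (pvALoop x y n.toNat 0 PySem.Set.empty))[j]
            = (List.foldl (fun a (i : Int) => a.set i.toNat '1')
            (List.replicate n.toNat '0') (pvALoop x y n.toNat 0 PySem.Set.empty)).getD j 'z' := by
          rw [List.getD_eq_getElem?_getD, List.getElem?_eq_getElem hj1]
          rfl
        rw [hconv, hloop]
        rw [pvFoldlMark_getD (pvQ x y K.toNat) (List.replicate n.toNat '0') j
          (by simp; omega)
          (fun v hv => ((hqmem v).mp hv).1)]
        simp only [hqmem ((j : Nat) : Int), hKtK]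
        by_cases hc : pvMval x y (j : Int) < K
        · rw [if_pos ⟨by omega, hjn, hc⟩, if_pos hc]
        · rw [if_neg (by tauto), if_neg hc]
          rw [List.getD_eq_getElem?_getD, List.getElem?_replicate, if_pos (by omega)]
          rfl
      rw [hl]
      -- right side
      have hjr : j < (PySem.List.pyRange 0 n).length := by
        rw [PySem.List.length_pyRange_one]; omega
      simp only [hm]
      rw [List.getElem_map, List.getElem_map, PySem.List.getElem_pyRange_one _ _ _ hjr]
      simp only [zero_add]
      rw [← hKdef]
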